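-- pv_equiv track=rewrite | github.com/Kalenghil/Advent_of_Code_2021 | 3/3b.py | amount_of_nums_by_digit
-- ===== SOURCE A (Python) =====
-- def amount_of_nums_by_digit(nums, len_of_num):
--     ans = [0] * len_of_num
--     for num in nums:
--         for i in range(len_of_num):
--             if num[i] == '1':
--                 ans[i] += 1
--             else:
--                 ans[i] -= 1
--     return ans
-- ===== SOURCE B (Python) =====
-- def amount_of_nums_by_digit(nums, len_of_num):
--     n = len(nums)
--     return [2 * sum(1 for num in nums if num[i] == '1') - n
--             for i in range(len_of_num)]
-- ===== Notes on version B (the rewrite author's own statement) =====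
-- stated objective: alternative
-- what changed: Replaces A's per-number +1/-1 mutation of an accumulator array by a column-wise pass: for each digit position count the ones and compute the balance as 2*ones - len(nums).
import Mathlib
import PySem

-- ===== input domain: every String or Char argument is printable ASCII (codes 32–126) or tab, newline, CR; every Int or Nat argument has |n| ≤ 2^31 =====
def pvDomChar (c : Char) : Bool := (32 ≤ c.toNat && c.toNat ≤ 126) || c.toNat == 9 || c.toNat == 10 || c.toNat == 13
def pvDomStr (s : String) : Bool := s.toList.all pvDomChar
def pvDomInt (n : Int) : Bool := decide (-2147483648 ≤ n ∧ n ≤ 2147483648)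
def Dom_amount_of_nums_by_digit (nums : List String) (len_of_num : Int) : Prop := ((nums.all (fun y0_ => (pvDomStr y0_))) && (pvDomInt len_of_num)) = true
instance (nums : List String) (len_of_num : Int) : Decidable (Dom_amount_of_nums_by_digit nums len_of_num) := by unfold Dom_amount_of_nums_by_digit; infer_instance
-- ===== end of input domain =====

-- B computes each column's balance as 2*ones - len(nums) in a per-column count pass
-- instead of A's per-number +1/-1 mutation of an accumulator array (alternative decomposition).


-- ===== PORT A =====
def amount_of_nums_by_digit (nums : List String) (len_of_num : Int) : List Int :=
  nums.foldl
    (fun ans num =>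
      (PySem.List.pyRange 0 len_of_num 1).foldl
        (fun ans i =>
          if PySem.Str.pyGet? num i = some '1' then
            ans.set i.toNat (ans.getD i.toNat 0 + 1)
          else
            ans.set i.toNat (ans.getD i.toNat 0 - 1))
        ans)
    (List.replicate len_of_num.toNat 0)

-- ===== PORT B =====
def amount_of_nums_by_digit_alt (nums : List String) (len_of_num : Int) : List Int :=
  (PySem.List.pyRange 0 len_of_num 1).map
    (fun i =>
      2 * (nums.countP (fun num => decide (PySem.Str.pyGet? num i = some '1')) : Int)
        - (nums.length : Int))

-- ===== PRECONDITION & SPEC =====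
-- Excludes exactly the inputs on which Python A raises IndexError: some num shorter than len_of_num.
def Pre_amount_of_nums_by_digit (nums : List String) (len_of_num : Int) : Prop :=
  ∀ s ∈ nums, len_of_num ≤ (s.toList.length : Int)
instance (nums : List String) (len_of_num : Int) : Decidable (Pre_amount_of_nums_by_digit nums len_of_num) := by unfold Pre_amount_of_nums_by_digit; infer_instance
def pvWitness_amount_of_nums_by_digit : List String × Int := (["10", "11", "01"], 2)

def Spec_amount_of_nums_by_digit (nums : List String) (len_of_num : Int) (out : List Int) : Prop := out = amount_of_nums_by_digit_alt nums len_of_num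
instance (nums : List String) (len_of_num : Int) (out : List Int) : Decidable (Spec_amount_of_nums_by_digit nums len_of_num out) := by unfold Spec_amount_of_nums_by_digit; infer_instance

-- ===== CLAIM (what is proved, stated in full; the proofs are below) =====
def Claim_equal_amount_of_nums_by_digit : Prop := ∀ (nums : List String) (len_of_num : Int), Dom_amount_of_nums_by_digit nums len_of_num → Pre_amount_of_nums_by_digit nums len_of_num → Spec_amount_of_nums_by_digit nums len_of_num (amount_of_nums_by_digit nums len_of_num)

-- ===== LEMMAS AND PROOFS =====

-- the inner (per-number) step, with the index already a Nat
def pvStepN (num : String) (ans : List Int) (k : Nat) : List Int :=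
  if PySem.Str.pyGet? num (k : Int) = some '1' then
    ans.set k (ans.getD k 0 + 1)
  else
    ans.set k (ans.getD k 0 - 1)

def pvVal (num : String) (k : Nat) : Int :=
  if PySem.Str.pyGet? num (k : Int) = some '1' then 1 else -1

lemma pvStepN_eq (num : String) (ans : List Int) (k : Nat) :
    pvStepN num ans k = ans.set k (ans.getD k 0 + pvVal num k) := by
  unfold pvStepN pvVal
  split <;> simp [sub_eq_add_neg]

lemma pvInner_len (num : String) (n : Nat) (ans : List Int) :
    ((List.range n).foldl (pvStepN num) ans).length = ans.length := by
  induction n generalizing ans with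
  | zero => simp
  | succ m ih =>
      rw [List.range_succ, List.foldl_append]
      simp [pvStepN_eq, ih]

lemma pvInner_getD (num : String) (n : Nat) (ans : List Int) (j : Nat) :
    n ≤ ans.length →
    ((List.range n).foldl (pvStepN num) ans).getD j 0
      = if j < n then ans.getD j 0 + pvVal num j else ans.getD j 0 := by
  induction n with
  | zero => intro _; simp
  | succ m ih =>
      intro hn
      rw [List.range_succ, List.foldl_append]
      have hlen : ((List.range m).foldl (pvStepN num) ans).length = ans.length :=
        pvInner_len num m ans
      simp only [List.foldl_cons, List.foldl_nil, pvStepN_eq]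
      have ihm := ih (by omega)
      by_cases hjm : j = m
      · subst hjm
        rw [List.getD_eq_getElem _ _ (by simp [hlen]; omega),
            List.getElem_set_self (by simp [hlen]; omega)]
        rw [ihm]; simp
      · rw [List.getD, List.getElem?_set_ne (by omega)]
        rw [← List.getD, ihm]
        by_cases h1 : j < m <;> by_cases h2 : j < m + 1 <;> simp [h1, h2] <;> omega

lemma pvOuter_len (nums : List String) (n : Nat) (ans : List Int) :
    (nums.foldl (fun a num => (List.range n).foldl (pvStepN num) a) ans).length = ans.length := by
  induction nums generalizing ans with
  | nil => simp
  | cons s t ih => simp [ih, pvInner_len]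

lemma pvOuter_getD (n j : Nat) (hj : j < n) (nums : List String) :
    ∀ ans : List Int, n ≤ ans.length →
      (nums.foldl (fun a num => (List.range n).foldl (pvStepN num) a) ans).getD j 0
        = ans.getD j 0
            + 2 * (nums.countP (fun s => decide (PySem.Str.pyGet? s (j : Int) = some '1')) : Int)
            - (nums.length : Int) := by
  induction nums with
  | nil => intro ans _; simp
  | cons s t ih =>
      intro ans hn
      have hlen : ((List.range n).foldl (pvStepN s) ans).length = ans.length :=
        pvInner_len s n ans
      simp only [List.foldl_cons]
      rw [ih _ (by omega), pvInner_getD s n ans j hn, if_pos hj]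
      simp only [List.countP_cons, List.length_cons]
      unfold pvVal
      by_cases h : s.toList[j]? = some '1' <;> simp [h] <;> ring

lemma pvPortA_eq (nums : List String) (len_of_num : Int) :
    amount_of_nums_by_digit nums len_of_num
      = nums.foldl
          (fun a num => (List.range len_of_num.toNat).foldl (pvStepN num) a)
          (List.replicate len_of_num.toNat 0) := by
  unfold amount_of_nums_by_digit
  rw [PySem.List.pyRange_one]
  simp only [Int.sub_zero]
  congr 1
  funext a num
  rw [List.foldl_map]
  congr 1
  funext ans k
  simp [pvStepN]

theorem amount_of_nums_by_digit_spec_aux (nums : List String) (len_of_num : Int)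
    (_hpre : Pre_amount_of_nums_by_digit nums len_of_num) :
    amount_of_nums_by_digit nums len_of_num = amount_of_nums_by_digit_alt nums len_of_num := by
  rw [pvPortA_eq]
  unfold amount_of_nums_by_digit_alt
  rw [PySem.List.pyRange_one]
  set L := len_of_num.toNat with hL
  have hsub : (len_of_num - 0).toNat = L := by omega
  rw [hsub]
  apply List.ext_getElem
  · rw [pvOuter_len]; simp
  · intro j h1 h2
    have hjL : j < L := by simpa [pvOuter_len] using h1
    have hA : (nums.foldl (fun a num => (List.range L).foldl (pvStepN num) a)
        (List.replicate L (0 : Int)))[j]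
          = 2 * (nums.countP (fun s => decide (PySem.Str.pyGet? s (j : Int) = some '1')) : Int)
              - (nums.length : Int) := by
      rw [← List.getD_eq_getElem _ 0 h1]
      rw [pvOuter_getD L j hjL nums (List.replicate L 0) (by simp)]
      simp
    rw [hA]
    simp

-- ===== VERDICT (by name: the statement is the Claim_ definition above) =====
theorem amount_of_nums_by_digit_spec : Claim_equal_amount_of_nums_by_digit := by
  intro nums len_of_num _ hpre
  exact amount_of_nums_by_digit_spec_aux nums len_of_num hpre
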